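-- pv_equiv track=rewrite | github.com/zarttic/cube_core | grid_core/spark_jobs/logical_partition_job.py | _group_tasks_for_local_processing
-- ===== SOURCE A (Python) =====
-- from collections import defaultdict
--
-- def _group_tasks_for_local_processing(tasks: list[dict]) -> list[list[dict]]:
--     grouped: dict[str, list[dict]] = defaultdict(list)
--     for task in tasks:
--         grouped[task["asset_path"]].append(task)
--     return [
--         sorted(rows, key=lambda row: row["space_code"])
--         for _, rows in sorted(grouped.items(), key=lambda item: item[0])
--     ]
-- ===== SOURCE B (Python) =====
-- def _group_tasks_for_local_processing(tasks: list[dict]) -> list[list[dict]]: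
--     # One global stable sort by the composite key, then a single linear
--     # group-by scan over the sorted list (no dict grouping, no per-group sort).
--     ordered = sorted(tasks, key=lambda t: (t["asset_path"], t["space_code"]))
--     result: list[list[dict]] = []
--     cur: list[dict] = []
--     for t in ordered:
--         if cur and cur[0]["asset_path"] == t["asset_path"]:
--             cur.append(t)
--         else:
--             if cur:
--                 result.append(cur)
--             cur = [t]
--     if cur:
--         result.append(cur)
--     return result
-- ===== Notes on version B (the rewrite author's own statement) =====
-- stated objective: alternative
-- what changed: Replaces A's defaultdict hash-grouping plus per-group sorts and a sort of the key/group pairs by one global stable sort on the composite key (asset_path, space_code) followed by a single linear group-by scan over the sorted list.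
import Mathlib
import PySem

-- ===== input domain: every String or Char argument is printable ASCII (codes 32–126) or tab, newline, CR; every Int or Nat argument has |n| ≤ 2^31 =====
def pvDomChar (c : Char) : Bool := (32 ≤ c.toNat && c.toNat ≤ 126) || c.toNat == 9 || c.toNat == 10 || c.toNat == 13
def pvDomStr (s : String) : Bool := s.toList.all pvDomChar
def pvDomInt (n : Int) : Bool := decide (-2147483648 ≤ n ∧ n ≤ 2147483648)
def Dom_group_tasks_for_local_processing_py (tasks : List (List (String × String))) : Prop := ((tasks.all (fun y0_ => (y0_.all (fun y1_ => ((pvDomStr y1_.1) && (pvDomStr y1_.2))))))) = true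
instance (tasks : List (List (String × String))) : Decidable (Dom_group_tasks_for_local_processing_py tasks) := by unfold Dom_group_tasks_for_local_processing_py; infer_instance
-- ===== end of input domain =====

-- B replaces A's defaultdict grouping + per-group sorts by one global stable sort on the
-- composite key followed by a linear group-by scan; same return value on Pre_ (no speed claim).

-- ===== PORT A =====
-- task[k] for a Python dict task: last-wins association-list lookup (KeyError → Pre_ excludes absence)
def pvGet (t : List (String × String)) (k : String) : String :=
  (PySem.Dict.ofList t).getD k ""

def group_tasks_for_local_processing_py (tasks : List (List (String × String))) : List (List (List (String × String))) :=
  let grouped : PySem.Dict String (List (List (String × String))) :=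
    tasks.foldl (fun d task => d.modify (pvGet task "asset_path") [] (fun rows => rows ++ [task]))
      PySem.Dict.empty
  (PySem.List.sorted grouped.items (fun item => item.1) false).map
    (fun item => PySem.List.sorted item.2 (fun row => pvGet row "space_code") false)

-- ===== PORT B =====
def group_tasks_for_local_processing_py_alt (tasks : List (List (String × String))) : List (List (List (String × String))) :=
  let ordered := PySem.List.sorted2 tasks (fun t => pvGet t "asset_path") (fun t => pvGet t "space_code") false
  let st := ordered.foldl
    (fun st t =>
      if !st.2.isEmpty && (pvGet (st.2.headD []) "asset_path" == pvGet t "asset_path")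
      then (st.1, st.2 ++ [t])
      else ((if st.2.isEmpty then st.1 else st.1 ++ [st.2]), [t]))
    (([], []) : List (List (List (String × String))) × List (List (String × String)))
  if st.2.isEmpty then st.1 else st.1 ++ [st.2]

-- ===== PRECONDITION & SPEC =====
-- Pre_ excludes tasks missing the "asset_path" or "space_code" key (Python A raises KeyError there)
-- and tasks whose association list carries a duplicate key, which does not correspond to a Python dict
-- (a dict cannot hold duplicate keys); A and B behave alike there, only the representation is ambiguous.
def Pre_group_tasks_for_local_processing_py (tasks : List (List (String × String))) : Prop :=
  ∀ task ∈ tasks, (task.map Prod.fst).Nodup ∧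
    "asset_path" ∈ task.map Prod.fst ∧ "space_code" ∈ task.map Prod.fst
instance (tasks : List (List (String × String))) : Decidable (Pre_group_tasks_for_local_processing_py tasks) := by
  unfold Pre_group_tasks_for_local_processing_py; infer_instance

def pvWitness_group_tasks_for_local_processing_py : (List (List (String × String))) :=
  [[("asset_path", "a"), ("space_code", "b")], [("asset_path", "a"), ("space_code", "a")]]

def Spec_group_tasks_for_local_processing_py (tasks : List (List (String × String))) (out : List (List (List (String × String)))) : Prop := out = group_tasks_for_local_processing_py_alt tasks
instance (tasks : List (List (String × String))) (out : List (List (List (String × String)))) : Decidable (Spec_group_tasks_for_local_processing_py tasks out) := by unfold Spec_group_tasks_for_local_processing_py; infer_instance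

-- ===== CLAIM (what is proved, stated in full; the proofs are below) =====
def Claim_equal_group_tasks_for_local_processing_py : Prop := ∀ (tasks : List (List (String × String))), Dom_group_tasks_for_local_processing_py tasks → Pre_group_tasks_for_local_processing_py tasks → Spec_group_tasks_for_local_processing_py tasks (group_tasks_for_local_processing_py tasks)

-- ===== LEMMAS AND PROOFS =====

-- the two key projections, the sorted distinct keys, one group, the canonical result both ports compute
def pvK1 (t : List (String × String)) : String := pvGet t "asset_path"
def pvK2 (t : List (String × String)) : String := pvGet t "space_code"

def pvKeys (tasks : List (List (String × String))) : List String :=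
  PySem.List.sorted (PySem.Set.ofList (tasks.map pvK1)) (fun x => x) false

def pvGroup (tasks : List (List (String × String))) (k : String) : List (List (String × String)) :=
  tasks.filter (fun t => pvK1 t == k)

def pvCanon (tasks : List (List (String × String))) : List (List (List (String × String))) :=
  (pvKeys tasks).map (fun k => PySem.List.sorted (pvGroup tasks k) pvK2 false)

-- B's lexicographic comparator, scan step and final flush
def pvLtLex (x y : List (String × String)) : Bool :=
  decide (pvK1 x < pvK1 y) || (!decide (pvK1 y < pvK1 x) && decide (pvK2 x < pvK2 y))

def pvStep (st : List (List (List (String × String))) × List (List (String × String)))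
    (t : List (String × String)) :
    List (List (List (String × String))) × List (List (String × String)) :=
  if !st.2.isEmpty && (pvGet (st.2.headD []) "asset_path" == pvGet t "asset_path")
  then (st.1, st.2 ++ [t])
  else ((if st.2.isEmpty then st.1 else st.1 ++ [st.2]), [t])
def pvFlush (st : List (List (List (String × String))) × List (List (String × String))) :
    List (List (List (String × String))) :=
  if st.2.isEmpty then st.1 else st.1 ++ [st.2]

lemma pv_insertBy_cons {α : Type} (b : α → α → Bool) (x y : α) (ys : List α) :
    PySem.List.insertBy b x (y :: ys) = if b x y then x :: y :: ys else y :: PySem.List.insertBy b x ys := rfl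

lemma pv_insertBy_agree_true {α : Type} (b b' : α → α → Bool) (x : α) (l l' : List α)
    (h1 : ∀ y ∈ l, b x y = b' x y) (h2 : ∀ y ∈ l', b x y = true) :
    PySem.List.insertBy b x (l ++ l') = PySem.List.insertBy b' x l ++ l' := by
  induction l with
  | nil =>
    simp only [List.nil_append]
    cases l' with
    | nil => rfl
    | cons y ys =>
      rw [pv_insertBy_cons, h2 y (by simp)]
      rfl
  | cons y l ih =>
    rw [List.cons_append, pv_insertBy_cons, pv_insertBy_cons, h1 y (by simp)]
    by_cases hb : b' x y = true
    · simp [hb]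
    · simp only [Bool.not_eq_true] at hb
      simp only [hb, Bool.false_eq_true, if_false, List.cons_append, List.cons.injEq, true_and]
      exact ih (fun z hz => h1 z (by simp [hz]))

lemma pv_insertBy_skip {α : Type} (b : α → α → Bool) (x : α) (l l' : List α)
    (h : ∀ y ∈ l, b x y = false) :
    PySem.List.insertBy b x (l ++ l') = l ++ PySem.List.insertBy b x l' := by
  induction l with
  | nil => rfl
  | cons y l ih =>
    rw [List.cons_append, pv_insertBy_cons, h y (by simp)]
    simp only [Bool.false_eq_true, if_false, List.cons_append, List.cons.injEq, true_and]
    exact ih (fun z hz => h z (by simp [hz]))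

-- lexicographic insertion into the flattened group structure
lemma pv_insert_flatMap (ks : List String) (h : String → List (List (String × String)))
    (t : List (String × String))
    (hks : ks.Pairwise (· < ·)) (hne : ∀ k ∈ ks, h k ≠ [])
    (hkey : ∀ k ∈ ks, ∀ x ∈ h k, pvK1 x = k)
    (ha : pvK1 t ∉ ks → h (pvK1 t) = []) :
    PySem.List.insertBy pvLtLex t (ks.flatMap h)
      = (if pvK1 t ∈ ks then ks else PySem.List.insertBy (fun a b => decide (a < b)) (pvK1 t) ks).flatMap
          (fun k => if k = pvK1 t then PySem.List.insertBy (fun a b => decide (pvK2 a < pvK2 b)) t (h k) else h k) := by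
  induction ks with
  | nil =>
    have h0 : h (pvK1 t) = [] := ha (by simp)
    simp [PySem.List.insertBy, h0]
  | cons k rest ih =>
    have hrest : ∀ k' ∈ rest, k < k' := fun k' hk' => List.rel_of_pairwise_cons hks hk'
    have hcongr : pvK1 t ∉ rest → ∀ k' ∈ rest,
        (if k' = pvK1 t then PySem.List.insertBy (fun a b => decide (pvK2 a < pvK2 b)) t (h k') else h k')
          = h k' :=
      fun hnm k' hk' => if_neg (fun hh => hnm (by rw [← hh]; exact hk'))
    rcases lt_trichotomy (pvK1 t) k with hlt | heq | hgt
    · -- t's key is new and smallest: t becomes a new first singleton group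
      have hak : pvK1 t ∉ k :: rest := by
        intro hmem
        rcases List.mem_cons.mp hmem with hh | hh
        · exact absurd hh (ne_of_lt hlt)
        · exact lt_irrefl _ (lt_trans hlt (hrest _ hh))
      have h0 : h (pvK1 t) = [] := ha hak
      obtain ⟨y, ys, hhk⟩ : ∃ y ys, h k = y :: ys := by
        cases hy : h k with
        | nil => exact absurd hy (hne k (by simp))
        | cons y ys => exact ⟨y, ys, rfl⟩
      have hyk : pvK1 y = k := hkey k (by simp) y (by rw [hhk]; simp)
      rw [if_neg hak, pv_insertBy_cons, if_pos (decide_eq_true hlt)]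
      simp only [List.flatMap_cons]
      simp only [if_true]
      rw [h0,
        List.flatMap_congr (hcongr (fun hm => hak (by simp [hm]))),
        if_neg (fun hh => hak (by rw [← hh]; simp))]
      rw [hhk, List.cons_append, pv_insertBy_cons]
      have hlex : pvLtLex t y = true := by simp [pvLtLex, hyk, hlt]
      rw [hlex, if_pos rfl]
      simp [PySem.List.insertBy]
    · -- t's key equals the first key: t is inserted into the first group by its second key
      subst heq
      have hnr : pvK1 t ∉ rest := fun hm => lt_irrefl _ (hrest _ hm)
      rw [if_pos (by simp)]
      simp only [List.flatMap_cons]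
      simp only [if_true]
      rw [List.flatMap_congr (hcongr hnr)]
      apply pv_insertBy_agree_true
      · intro y hy
        have hk1 : pvK1 y = pvK1 t := hkey _ (by simp) y hy
        simp [pvLtLex, hk1]
      · intro y hy
        obtain ⟨k', hk', hyk'⟩ := List.mem_flatMap.mp hy
        have h1 : pvK1 y = k' := hkey k' (by simp [hk']) y hyk'
        have h2 : pvK1 t < pvK1 y := h1 ▸ hrest k' hk'
        simp [pvLtLex, h2]
    · -- t's key is larger than the first key: skip the first group and recurse
      have hka : pvK1 t ≠ k := (ne_of_lt hgt).symm
      have hskip : PySem.List.insertBy pvLtLex t ((k :: rest).flatMap h)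
          = h k ++ PySem.List.insertBy pvLtLex t (rest.flatMap h) := by
        rw [List.flatMap_cons]
        apply pv_insertBy_skip
        intro y hy
        have h1 : pvK1 y = k := hkey k (by simp) y hy
        simp [pvLtLex, h1, hgt, not_lt_of_gt hgt]
      have ihr := ih (List.Pairwise.of_cons hks)
        (fun k' hk' => hne k' (by simp [hk']))
        (fun k' hk' => hkey k' (by simp [hk']))
        (fun hnm => ha (fun hmem => by
          rcases List.mem_cons.mp hmem with hh | hh
          · exact hka hh
          · exact hnm hh))
      rw [hskip, ihr]
      have hfk : (if k = pvK1 t then PySem.List.insertBy (fun a b => decide (pvK2 a < pvK2 b)) t (h k) else h k)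
          = h k := if_neg (fun hh => hka hh.symm)
      by_cases ham : pvK1 t ∈ rest
      · rw [if_pos ham, if_pos (by simp [ham]), List.flatMap_cons, hfk]
      · rw [if_neg ham, if_neg (by simp [hka, ham]), pv_insertBy_cons,
          if_neg (by simp [not_lt_of_gt hgt]), List.flatMap_cons, hfk]

lemma pv_sorted_append_singleton {α κ : Type} [LT κ] [DecidableLT κ] (xs : List α) (x : α) (key : α → κ) :
    PySem.List.sorted (xs ++ [x]) key false
      = PySem.List.insertBy (fun a b => decide (key a < key b)) x (PySem.List.sorted xs key false) := by
  rw [PySem.List.sorted_eq_foldl_insertBy, PySem.List.sorted_eq_foldl_insertBy]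
  simp [List.foldl_append]

lemma pv_sorted2_foldl (xs : List (List (String × String))) :
    PySem.List.sorted2 xs (fun t => pvGet t "asset_path") (fun t => pvGet t "space_code") false
      = xs.foldl (fun acc x => PySem.List.insertBy pvLtLex x acc) [] := rfl

-- the three structural facts about the canonical groups
lemma pv_keys_pairwise (tasks : List (List (String × String))) :
    (pvKeys tasks).Pairwise (· < ·) := PySem.List.sorted_ofList_pairwise_lt _

lemma pv_mem_keys (tasks : List (List (String × String))) (k : String) :
    k ∈ pvKeys tasks ↔ k ∈ tasks.map pvK1 := by
  unfold pvKeys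
  rw [PySem.List.mem_sorted, PySem.Set.mem_ofList]

lemma pv_group_eq_nil (tasks : List (List (String × String))) (k : String)
    (hk : k ∉ tasks.map pvK1) : pvGroup tasks k = [] := by
  unfold pvGroup
  rw [List.filter_eq_nil_iff]
  intro x hx hbeq
  exact hk (List.mem_map.mpr ⟨x, hx, eq_of_beq hbeq⟩)

lemma pv_sgroup_ne (tasks : List (List (String × String))) (k : String) (hk : k ∈ pvKeys tasks) :
    PySem.List.sorted (pvGroup tasks k) pvK2 false ≠ [] := by
  rw [Ne, PySem.List.sorted_eq_nil_iff]
  obtain ⟨x, hx, hxk⟩ := List.mem_map.mp ((pv_mem_keys tasks k).mp hk)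
  exact List.ne_nil_of_mem (List.mem_filter.mpr ⟨hx, beq_iff_eq.mpr hxk⟩)

lemma pv_sgroup_key (tasks : List (List (String × String))) (k : String)
    (x : List (String × String)) (hx : x ∈ PySem.List.sorted (pvGroup tasks k) pvK2 false) :
    pvK1 x = k := by
  rw [PySem.List.mem_sorted] at hx
  exact beq_iff_eq.mp (List.mem_filter.mp hx).2

lemma pv_group_append (tasks : List (List (String × String))) (t : List (String × String)) (k : String) :
    pvGroup (tasks ++ [t]) k = pvGroup tasks k ++ if pvK1 t = k then [t] else [] := by
  unfold pvGroup
  rw [List.filter_append]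
  congr 1
  by_cases hh : pvK1 t = k <;> simp [hh]

-- the global composite-key sort is the flattened canonical group structure
lemma pv_sorted2_flat (tasks : List (List (String × String))) :
    PySem.List.sorted2 tasks (fun t => pvGet t "asset_path") (fun t => pvGet t "space_code") false
      = (pvKeys tasks).flatMap (fun k => PySem.List.sorted (pvGroup tasks k) pvK2 false) := by
  induction tasks using List.reverseRecOn with
  | nil => rfl
  | append_singleton tasks t ih =>
    rw [pv_sorted2_foldl, List.foldl_append]
    simp only [List.foldl_cons, List.foldl_nil]
    rw [← pv_sorted2_foldl, ih]
    rw [pv_insert_flatMap (pvKeys tasks) _ t (pv_keys_pairwise tasks)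
      (fun k hk => pv_sgroup_ne tasks k hk)
      (fun k hk x hx => pv_sgroup_key tasks k x hx)
      (fun hnm => by
        rw [PySem.List.sorted_eq_nil_iff]
        exact pv_group_eq_nil tasks _ (fun hm => hnm ((pv_mem_keys tasks _).mpr hm)))]
    -- now identify the updated key list and groups
    have hS : PySem.Set.ofList ((tasks ++ [t]).map pvK1)
        = PySem.Set.add (PySem.Set.ofList (tasks.map pvK1)) (pvK1 t) := by
      rw [List.map_append, PySem.Set.ofList_eq_foldl, PySem.Set.ofList_eq_foldl, List.foldl_append]
      rfl
    by_cases hmem : pvK1 t ∈ pvKeys tasks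
    · have hmem' : pvK1 t ∈ PySem.Set.ofList (tasks.map pvK1) := by
        unfold pvKeys at hmem; rwa [PySem.List.mem_sorted] at hmem
      have hkeys : pvKeys (tasks ++ [t]) = pvKeys tasks := by
        unfold pvKeys
        rw [hS, PySem.Set.add_of_mem hmem']
      rw [if_pos hmem, hkeys]
      apply List.flatMap_congr
      intro k hk
      rw [pv_group_append]
      by_cases hkt : k = pvK1 t
      · subst hkt
        rw [if_pos rfl, if_pos rfl, pv_sorted_append_singleton]
      · rw [if_neg hkt, if_neg (fun hh => hkt hh.symm), List.append_nil]
    · have hmem' : pvK1 t ∉ PySem.Set.ofList (tasks.map pvK1) := by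
        unfold pvKeys at hmem; rwa [PySem.List.mem_sorted] at hmem
      have hkeys : pvKeys (tasks ++ [t])
          = PySem.List.insertBy (fun a b => decide (a < b)) (pvK1 t) (pvKeys tasks) := by
        unfold pvKeys
        rw [hS, PySem.Set.add_of_not_mem hmem']
        exact pv_sorted_append_singleton _ _ _
      rw [if_neg hmem, hkeys]
      apply List.flatMap_congr
      intro k hk
      rw [pv_group_append]
      by_cases hkt : k = pvK1 t
      · subst hkt
        rw [if_pos rfl, if_pos rfl,
          pv_group_eq_nil tasks _ (fun hm => hmem ((pv_mem_keys tasks _).mpr hm))]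
        rfl
      · rw [if_neg hkt, if_neg (fun hh => hkt hh.symm), List.append_nil]

-- the scan absorbs a whole constant-key group into the current run
lemma pv_scan_group (g : List (List (String × String)))
    (res : List (List (List (String × String)))) (cur : List (List (String × String)))
    (hcur : cur ≠ []) (hg : ∀ x ∈ g, pvK1 x = pvK1 (cur.headD [])) :
    g.foldl pvStep (res, cur) = (res, cur ++ g) := by
  induction g generalizing cur with
  | nil => simp
  | cons x g ih =>
    obtain ⟨c, cs, rfl⟩ : ∃ c cs, cur = c :: cs := by
      cases cur with
      | nil => exact absurd rfl hcur
      | cons c cs => exact ⟨c, cs, rfl⟩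
    have hx : pvGet c "asset_path" == pvGet x "asset_path" := by
      have := hg x (by simp)
      simp only [List.headD_cons] at this
      exact beq_iff_eq.mpr this.symm
    rw [List.foldl_cons]
    have hstep : pvStep (res, c :: cs) x = (res, (c :: cs) ++ [x]) := by
      unfold pvStep
      simp [hx]
    rw [hstep, ih ((c :: cs) ++ [x]) (by simp)
      (fun z hz => by
        simpa using hg z (by simp [hz]))]
    simp

-- the scan over a flattened good group structure recovers the groups
lemma pv_scan_flat (ks : List String) (h : String → List (List (String × String)))
    (res : List (List (List (String × String)))) (cur : List (List (String × String)))
    (hks : ks.Pairwise (· < ·)) (hne : ∀ k ∈ ks, h k ≠ [])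
    (hkey : ∀ k ∈ ks, ∀ x ∈ h k, pvK1 x = k)
    (hcur : cur ≠ [] → ∀ a ∈ ks, pvK1 (cur.headD []) ≠ a) :
    pvFlush ((ks.flatMap h).foldl pvStep (res, cur)) = pvFlush (res, cur) ++ ks.map h := by
  induction ks generalizing res cur with
  | nil => simp
  | cons k rest ih =>
    obtain ⟨y, ys, hhk⟩ : ∃ y ys, h k = y :: ys := by
      cases hy : h k with
      | nil => exact absurd hy (hne k (by simp))
      | cons y ys => exact ⟨y, ys, rfl⟩
    have hyk : pvK1 y = k := hkey k (by simp) y (by rw [hhk]; simp)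
    have hstep : pvStep (res, cur) y = (pvFlush (res, cur), [y]) := by
      cases cur with
      | nil => unfold pvStep pvFlush; simp
      | cons c cs =>
        have hne' : (pvGet c "asset_path" == pvGet y "asset_path") = false := by
          have := hcur (by simp) k (by simp)
          simp only [List.headD_cons] at this
          exact beq_eq_false_iff_ne.mpr (fun hh => this (hyk ▸ hh))
        unfold pvStep pvFlush
        simp [hne']
    rw [List.flatMap_cons, List.foldl_append, hhk, List.foldl_cons, hstep,
      pv_scan_group ys (pvFlush (res, cur)) [y] (by simp)
        (fun z hz => by
          simp only [List.headD_cons]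
          rw [hkey k (by simp) z (by rw [hhk]; simp [hz]), hyk]),
      ih (pvFlush (res, cur)) ([y] ++ ys)
        (List.Pairwise.of_cons hks)
        (fun k' hk' => hne k' (by simp [hk']))
        (fun k' hk' => hkey k' (by simp [hk']))
        (fun _ a ha => by
          simp only [List.cons_append, List.headD_cons, hyk]
          exact ne_of_lt (List.rel_of_pairwise_cons hks ha))]
    rw [show ([y] ++ ys) = h k from hhk.symm]
    have hfl : pvFlush (pvFlush (res, cur), h k) = pvFlush (res, cur) ++ [h k] := by
      unfold pvFlush
      rw [if_neg (by simp [hhk])]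
    rw [hfl, List.map_cons]
    simp

-- B computes the canonical result
lemma pv_b_eq_canon (tasks : List (List (String × String))) :
    group_tasks_for_local_processing_py_alt tasks = pvCanon tasks := by
  show pvFlush ((PySem.List.sorted2 tasks (fun t => pvGet t "asset_path")
      (fun t => pvGet t "space_code") false).foldl pvStep ([], [])) = pvCanon tasks
  rw [pv_sorted2_flat,
    pv_scan_flat (pvKeys tasks) _ [] [] (pv_keys_pairwise tasks)
      (fun k hk => pv_sgroup_ne tasks k hk)
      (fun k hk x hx => pv_sgroup_key tasks k x hx)
      (fun hc => absurd rfl hc)]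
  rfl

-- A computes the canonical result
lemma pv_a_eq_canon (tasks : List (List (String × String))) :
    group_tasks_for_local_processing_py tasks = pvCanon tasks := by
  show (PySem.List.sorted
      (tasks.foldl (fun d task => d.modify (pvK1 task) [] (fun rows => rows ++ [task]))
        PySem.Dict.empty).items (fun item => item.1) false).map
      (fun item => PySem.List.sorted item.2 (fun row => pvK2 row) false) = pvCanon tasks
  have hkeys : (tasks.foldl (fun d task => d.modify (pvK1 task) [] (fun rows => rows ++ [task]))
      PySem.Dict.empty).keys = PySem.Set.ofList (tasks.map pvK1) := by
    rw [PySem.Dict.keys_foldl_modify_key tasks pvK1 [] (fun _ x rows => rows ++ [x]) PySem.Dict.empty]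
    rw [PySem.Dict.keys_empty, PySem.Set.ofList_eq_foldl]
    rfl
  have hnodup : (tasks.foldl (fun d task => d.modify (pvK1 task) [] (fun rows => rows ++ [task]))
      PySem.Dict.empty).keys.Nodup :=
    PySem.Dict.nodup_keys_foldl_modify_key tasks pvK1 [] (fun _ x rows => rows ++ [x]) PySem.Dict.empty
      PySem.Dict.nodup_keys_empty
  have hgetD : ∀ k, (tasks.foldl (fun d task => d.modify (pvK1 task) [] (fun rows => rows ++ [task]))
      PySem.Dict.empty).getD k [] = pvGroup tasks k := by
    intro k
    have hmap : tasks.foldl (fun d task => d.modify (pvK1 task) [] (fun rows => rows ++ [task]))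
        PySem.Dict.empty
        = (tasks.map (fun t => (pvK1 t, t))).foldl (fun d p => d.modify p.1 [] (fun rows => rows ++ [p.2]))
          PySem.Dict.empty := by
      rw [List.foldl_map]
    rw [hmap, PySem.Dict.getD_foldl_modify_append, PySem.Dict.getD_empty]
    unfold pvGroup
    rw [List.filter_map, List.map_map]
    simp [Function.comp_def]
  have hitems : (tasks.foldl (fun d task => d.modify (pvK1 task) [] (fun rows => rows ++ [task]))
      PySem.Dict.empty).items
      = (PySem.Set.ofList (tasks.map pvK1)).map (fun k => (k, pvGroup tasks k)) := by
    rw [PySem.Dict.items_eq_map_keys _ hnodup [], hkeys]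
    exact List.map_congr_left (fun k _ => by rw [hgetD k])
  rw [hitems]
  have hsorted : PySem.List.sorted
      ((PySem.Set.ofList (tasks.map pvK1)).map (fun k => (k, pvGroup tasks k))) (fun item => item.1) false
      = (pvKeys tasks).map (fun k => (k, pvGroup tasks k)) := by
    apply PySem.List.sorted_eq_of_perm_of_pairwise_lt
    · exact (PySem.List.sorted_perm _ _ _).map _
    · rw [List.pairwise_map]
      exact PySem.List.sorted_ofList_pairwise_lt _
  rw [hsorted, List.map_map]
  rfl

-- ===== VERDICT (by name: the statement is the Claim_ definition above) =====
theorem group_tasks_for_local_processing_py_spec : Claim_equal_group_tasks_for_local_processing_py := by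
  intro tasks _ _
  unfold Spec_group_tasks_for_local_processing_py
  rw [pv_a_eq_canon, pv_b_eq_canon]
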